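-- pv_equiv track=rewrite | github.com/Maxd646/LeetCode-Tracker | leetcode-solutions/pro 3431-minimum-unlocked-indices-to-sort-nums/solution.py | minUnlockedIndices
-- ===== SOURCE A (Python) =====
-- from typing import List
--
-- def minUnlockedIndices(nums: List[int], locked: List[int]) -> int:
--     n = len(nums)
--     first2 = first3 = n
--     last1 = last2 = -1
--     for i, x in enumerate(nums):
--         if x == 1:
--             last1 = i
--         elif x == 2:
--             first2 = min(first2, i)
--             last2 = i
--         else:
--             first3 = min(first3, i)
--     if first3 < last1:
--         return -1
--     return sum(
--         st and (first2 <= i < last1 or first3 <= i < last2)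
--         for i, st in enumerate(locked)
--     )
-- ===== SOURCE B (Python) =====
-- # B: finds the four boundary indices with next() over (reversed) enumerations,
-- # then counts truthy locked entries over the two disjoint windows directly.
-- from typing import List
--
-- def minUnlockedIndices(nums: List[int], locked: List[int]) -> int:
--     n = len(nums)
--     first2 = next((i for i, x in enumerate(nums) if x == 2), n)
--     first3 = next((i for i, x in enumerate(nums) if x != 1 and x != 2), n)
--     last1 = next((n - 1 - j for j, x in enumerate(reversed(nums)) if x == 1), -1)
--     last2 = next((n - 1 - j for j, x in enumerate(reversed(nums)) if x == 2), -1)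
--     if first3 < last1:
--         return -1
--     m = len(locked)
--     return (sum(1 for i in range(first2, min(last1, m)) if locked[i])
--             + sum(1 for i in range(first3, min(last2, m)) if locked[i]))
-- ===== Notes on version B (the rewrite author's own statement) =====
-- stated objective: alternative
-- what changed: A's four boundary indices come from a single four-accumulator loop and the count from a full scan of locked with a two-clause window predicate; B finds each boundary with next() over a (reversed) enumeration with early exit and counts truthy locked entries by iterating only the two disjoint clipped windows.
import Mathlib
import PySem

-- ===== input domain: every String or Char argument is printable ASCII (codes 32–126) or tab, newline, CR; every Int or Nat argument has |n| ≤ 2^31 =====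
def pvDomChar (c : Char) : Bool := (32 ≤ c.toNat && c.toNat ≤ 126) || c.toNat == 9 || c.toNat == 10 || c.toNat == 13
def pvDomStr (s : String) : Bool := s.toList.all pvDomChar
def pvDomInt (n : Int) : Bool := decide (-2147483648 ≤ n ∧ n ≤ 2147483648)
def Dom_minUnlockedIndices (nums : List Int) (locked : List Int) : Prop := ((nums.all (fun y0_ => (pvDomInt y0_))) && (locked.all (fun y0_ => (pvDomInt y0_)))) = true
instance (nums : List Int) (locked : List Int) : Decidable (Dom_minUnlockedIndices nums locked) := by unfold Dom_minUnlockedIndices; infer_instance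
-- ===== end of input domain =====

-- B finds the four boundary indices with next() over (reversed) enumerations and counts
-- truthy locked entries over the two disjoint index windows directly (objective: alternative).

-- ===== PORT A =====
-- A's single for-loop over enumerate(nums) with its four accumulators.
def pvLoopA : Int → Int → Int → Int → Int → List Int → Int × Int × Int × Int
  | _, f2, f3, l1, l2, [] => (f2, f3, l1, l2)
  | i, f2, f3, l1, l2, x :: xs =>
    if x == 1 then pvLoopA (i + 1) f2 f3 i l2 xs
    else if x == 2 then pvLoopA (i + 1) (min f2 i) f3 l1 i xs
    else pvLoopA (i + 1) f2 (min f3 i) l1 l2 xs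

def minUnlockedIndices (nums : List Int) (locked : List Int) : Int :=
  let n : Int := nums.length
  let s := pvLoopA 0 n n (-1) (-1) nums
  -- s = (first2, first3, last1, last2)
  if s.2.1 < s.2.2.1 then -1
  else
    -- sum(st and (first2 <= i < last1 or first3 <= i < last2) for i, st in enumerate(locked))
    (PySem.List.enumerate locked 0).foldl
      (fun acc p =>
        acc + (if p.2 == 0 then p.2
               else if (s.1 ≤ p.1 ∧ p.1 < s.2.2.1) ∨ (s.2.1 ≤ p.1 ∧ p.1 < s.2.2.2) then 1 else 0))
      0

-- ===== PORT B =====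
def minUnlockedIndices_alt (nums : List Int) (locked : List Int) : Int :=
  let n : Int := nums.length
  let first2 := (((PySem.List.enumerate nums 0).find? (fun p => p.2 == 2)).map (·.1)).getD n
  let first3 := (((PySem.List.enumerate nums 0).find? (fun p => p.2 != 1 && p.2 != 2)).map (·.1)).getD n
  let last1 := (((PySem.List.enumerate nums.reverse 0).find? (fun p => p.2 == 1)).map (fun p => n - 1 - p.1)).getD (-1)
  let last2 := (((PySem.List.enumerate nums.reverse 0).find? (fun p => p.2 == 2)).map (fun p => n - 1 - p.1)).getD (-1)
  if first3 < last1 then -1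
  else
    let m : Int := locked.length
    -- locked[i] is always in range here: the windows are clipped by min(..., m)
    (PySem.List.pyRange first2 (min last1 m) 1).foldl
      (fun acc i => if PySem.List.pyGetD locked i 0 ≠ 0 then acc + 1 else acc) 0
    + (PySem.List.pyRange first3 (min last2 m) 1).foldl
      (fun acc i => if PySem.List.pyGetD locked i 0 ≠ 0 then acc + 1 else acc) 0

-- ===== PRECONDITION & SPEC =====
def Spec_minUnlockedIndices (nums : List Int) (locked : List Int) (out : Int) : Prop := out = minUnlockedIndices_alt nums locked
instance (nums : List Int) (locked : List Int) (out : Int) : Decidable (Spec_minUnlockedIndices nums locked out) := by unfold Spec_minUnlockedIndices; infer_instance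

-- ===== CLAIM (what is proved, stated in full; the proofs are below) =====
def Claim_equal_minUnlockedIndices : Prop := ∀ (nums : List Int) (locked : List Int), Dom_minUnlockedIndices nums locked → Spec_minUnlockedIndices nums locked (minUnlockedIndices nums locked)

-- ===== LEMMAS AND PROOFS =====

-- the four accumulators of A's loop, as independent folds
def pvFirst (q : Int → Bool) : List Int → Int → Int → Int
  | [], _, c => c
  | x :: xs, i, c => pvFirst q xs (i + 1) (if q x then min c i else c)

def pvLast (q : Int → Bool) : List Int → Int → Int → Int
  | [], _, c => c
  | x :: xs, i, c => pvLast q xs (i + 1) (if q x then i else c)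

theorem pvLoopA_split : ∀ (xs : List Int) (i f2 f3 l1 l2 : Int),
    pvLoopA i f2 f3 l1 l2 xs
      = (pvFirst (· == 2) xs i f2,
         pvFirst (fun x => x != 1 && x != 2) xs i f3,
         pvLast (· == 1) xs i l1,
         pvLast (· == 2) xs i l2) := by
  intro xs
  induction xs with
  | nil => intro i f2 f3 l1 l2; rfl
  | cons x xs ih =>
    intro i f2 f3 l1 l2
    by_cases h1 : x = 1
    · subst h1; simp [pvLoopA, pvFirst, pvLast, ih]
    · by_cases h2 : x = 2
      · subst h2; simp [pvLoopA, pvFirst, pvLast, ih]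
      · simp [pvLoopA, pvFirst, pvLast, ih, h1, h2]

theorem pvFirst_stable (q : Int → Bool) : ∀ (xs : List Int) (i c : Int), c ≤ i → pvFirst q xs i c = c := by
  intro xs
  induction xs with
  | nil => intro i c _; rfl
  | cons x xs ih =>
    intro i c h
    by_cases hq : q x
    · simp [pvFirst, hq]
      rw [min_eq_left h]
      exact ih _ _ (by omega)
    · simp [pvFirst, hq]
      exact ih _ _ (by omega)

theorem pvFirst_eq_find (q : Int → Bool) : ∀ (xs : List Int) (i c : Int),
    pvFirst q xs i c
      = match (PySem.List.enumerate xs i).find? (fun p => q p.2) with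
        | some p => min c p.1
        | none => c := by
  intro xs
  induction xs with
  | nil => intro i c; rfl
  | cons x xs ih =>
    intro i c
    by_cases hq : q x
    · simp [pvFirst, hq, PySem.List.enumerate_cons]
      exact pvFirst_stable q xs (i + 1) (min c i) (by omega)
    · simp [pvFirst, hq, PySem.List.enumerate_cons]
      exact ih _ _

theorem pvLast_append (q : Int → Bool) : ∀ (xs ys : List Int) (i c : Int),
    pvLast q (xs ++ ys) i c = pvLast q ys (i + (xs.length : Int)) (pvLast q xs i c) := by
  intro xs
  induction xs with
  | nil => intro ys i c; simp [pvLast]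
  | cons x xs ih =>
    intro ys i c
    simp only [List.cons_append, pvLast, ih]
    congr 1
    simp only [List.length_cons]
    push_cast
    omega

theorem find?_enumerate_succ {α : Type} (q : α → Bool) : ∀ (l : List α) (s : Int),
    (PySem.List.enumerate l (s + 1)).find? (fun p => q p.2)
      = ((PySem.List.enumerate l s).find? (fun p => q p.2)).map (fun p => (p.1 + 1, p.2)) := by
  intro l
  induction l with
  | nil => intro s; rfl
  | cons x xs ih =>
    intro s
    by_cases hq : q x
    · simp [PySem.List.enumerate_cons, hq]
    · simp only [PySem.List.enumerate_cons, List.find?_cons, hq]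
      simpa using ih (s + 1)

theorem pvLast_eq_find (q : Int → Bool) : ∀ (xs : List Int) (c : Int),
    pvLast q xs 0 c
      = match (PySem.List.enumerate xs.reverse 0).find? (fun p => q p.2) with
        | some p => (xs.length : Int) - 1 - p.1
        | none => c := by
  intro xs
  induction xs using List.reverseRecOn with
  | nil => intro c; rfl
  | append_singleton ys x ih =>
    intro c
    rw [pvLast_append]
    by_cases hq : q x
    · simp [pvLast, hq, PySem.List.enumerate_cons]
    · simp only [pvLast, hq, List.reverse_append, List.reverse_singleton, List.singleton_append,
        PySem.List.enumerate_cons, List.find?_cons, Bool.false_eq_true]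
      rw [show (0 : Int) + 1 = 0 + 1 by rfl, find?_enumerate_succ, ih c]
      cases h : (PySem.List.enumerate ys.reverse 0).find? (fun p => q p.2) with
      | none => simp
      | some p => simp; ring

-- bounds on a found enumerate index
theorem find?_enumerate_bounds {α : Type} (q : Int × α → Bool) (xs : List α) (p : Int × α)
    (h : (PySem.List.enumerate xs 0).find? q = some p) :
    0 ≤ p.1 ∧ p.1 < (xs.length : Int) := by
  have hmem := List.mem_of_find?_eq_some h
  rw [PySem.List.mem_enumerate_iff] at hmem
  obtain ⟨k, hk, rfl⟩ := hmem
  constructor <;> (simp; try omega)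

theorem countP_or_disjoint {α : Type} (p q : α → Bool) (h : ∀ x, ¬(p x = true ∧ q x = true)) :
    ∀ (L : List α), L.countP (fun x => p x || q x) = L.countP p + L.countP q := by
  intro L
  induction L with
  | nil => rfl
  | cons x xs ih =>
    by_cases hp : p x
    · have hq : q x = false := by
        by_contra hq'
        exact h x ⟨hp, by simpa using hq'⟩
      simp [hp, hq, ih]; omega
    · simp only [List.countP_cons, ih]
      by_cases hq : q x <;> (simp [hp, hq]; try omega)

theorem filter_pyRange_interval : ∀ (k : Nat) (a b lo hi : Int), (b - a).toNat = k →
    (PySem.List.pyRange a b 1).filter (fun j => decide (lo ≤ j ∧ j < hi))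
      = PySem.List.pyRange (max a lo) (min b hi) 1 := by
  intro k
  induction k with
  | zero =>
    intro a b lo hi hk
    have hab : b ≤ a := by omega
    rw [PySem.List.pyRange_one_eq_nil hab, PySem.List.pyRange_one_eq_nil (by omega)]
    rfl
  | succ k ih =>
    intro a b lo hi hk
    have hab : a < b := by omega
    rw [PySem.List.pyRange_one_cons hab, List.filter_cons]
    by_cases hin : lo ≤ a ∧ a < hi
    · rw [if_pos (by simpa using hin)]
      rw [ih (a + 1) b lo hi (by omega)]
      rw [show max (a + 1) lo = a + 1 by omega, show max a lo = a by omega]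
      rw [show PySem.List.pyRange a (min b hi) 1
            = a :: PySem.List.pyRange (a + 1) (min b hi) 1 from
          PySem.List.pyRange_one_cons (by omega)]
    · rw [if_neg (by simpa using hin)]
      rw [ih (a + 1) b lo hi (by omega)]
      by_cases hlo : lo ≤ a
      · -- then hi ≤ a : both ranges empty
        have hhi : hi ≤ a := by omega
        rw [show PySem.List.pyRange (max (a + 1) lo) (min b hi) 1 = [] from
              PySem.List.pyRange_one_eq_nil (by omega),
            show PySem.List.pyRange (max a lo) (min b hi) 1 = [] from
              PySem.List.pyRange_one_eq_nil (by omega)]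
      · rw [show max (a + 1) lo = lo by omega, show max a lo = lo by omega]

-- one window: the part of A's full scan selected by one interval clause
theorem countP_window (locked : List Int) (a b : Int) (ha : 0 ≤ a) :
    (PySem.List.pyRange 0 (locked.length : Int) 1).countP
        (fun j => decide (PySem.List.pyGetD locked j 0 ≠ 0) && decide (a ≤ j ∧ j < b))
      = (PySem.List.pyRange a (min b (locked.length : Int)) 1).countP
          (fun j => decide (PySem.List.pyGetD locked j 0 ≠ 0)) := by
  rw [← List.countP_filter,
      filter_pyRange_interval ((locked.length : Int) - 0).toNat 0 (locked.length : Int) a b rfl]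
  rw [show max 0 a = a by omega, min_comm]

-- the core counting identity, for both windows at once
theorem count_split (locked : List Int) (f2 f3 l1 l2 : Int)
    (h2 : 0 ≤ f2) (h3 : 0 ≤ f3) (hd : l1 ≤ f3) :
    (PySem.List.enumerate locked 0).foldl
      (fun acc p =>
        acc + (if p.2 == 0 then p.2
               else if (f2 ≤ p.1 ∧ p.1 < l1) ∨ (f3 ≤ p.1 ∧ p.1 < l2) then 1 else 0)) 0
    = (PySem.List.pyRange f2 (min l1 (locked.length : Int)) 1).foldl
        (fun acc i => if PySem.List.pyGetD locked i 0 ≠ 0 then acc + 1 else acc) 0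
      + (PySem.List.pyRange f3 (min l2 (locked.length : Int)) 1).foldl
          (fun acc i => if PySem.List.pyGetD locked i 0 ≠ 0 then acc + 1 else acc) 0 := by
  rw [PySem.List.foldl_ite_add_one, PySem.List.foldl_ite_add_one]
  rw [PySem.List.enumerate_eq_map_pyRange locked 0, List.foldl_map]
  have hpt : ∀ (acc j : Int),
      acc + (if PySem.List.pyGetD locked j 0 == 0 then PySem.List.pyGetD locked j 0
             else if (f2 ≤ j ∧ j < l1) ∨ (f3 ≤ j ∧ j < l2) then 1 else 0)
      = (fun acc j =>
          if PySem.List.pyGetD locked j 0 ≠ 0 ∧ ((f2 ≤ j ∧ j < l1) ∨ (f3 ≤ j ∧ j < l2))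
          then acc + 1 else acc) acc j := by
    intro acc j
    by_cases hz : PySem.List.pyGetD locked j 0 = 0
    · simp [hz]
    · by_cases hc : (f2 ≤ j ∧ j < l1) ∨ (f3 ≤ j ∧ j < l2) <;> simp [hz, hc]
  have hfold : (PySem.List.pyRange 0 (PySem.List.len locked)).foldl
        (fun (acc j : Int) =>
          acc + (if PySem.List.pyGetD locked j 0 == 0 then PySem.List.pyGetD locked j 0
                 else if (f2 ≤ j ∧ j < l1) ∨ (f3 ≤ j ∧ j < l2) then 1 else 0)) 0
      = (PySem.List.pyRange 0 (PySem.List.len locked)).foldl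
        (fun (acc j : Int) =>
          if PySem.List.pyGetD locked j 0 ≠ 0 ∧ ((f2 ≤ j ∧ j < l1) ∨ (f3 ≤ j ∧ j < l2))
          then acc + 1 else acc) 0 :=
    PySem.List.foldl_congr_mem _ _ _ _ (fun acc x _ => hpt acc x)
  refine Eq.trans (Eq.trans rfl hfold) ?_
  rw [PySem.List.foldl_ite_add_one, PySem.List.len_eq]
  have hsplit : (PySem.List.pyRange 0 (locked.length : Int) 1).countP
      (fun j => decide (PySem.List.pyGetD locked j 0 ≠ 0 ∧ ((f2 ≤ j ∧ j < l1) ∨ (f3 ≤ j ∧ j < l2))))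
    = (PySem.List.pyRange 0 (locked.length : Int) 1).countP
        (fun j => (decide (PySem.List.pyGetD locked j 0 ≠ 0) && decide (f2 ≤ j ∧ j < l1))
          || (decide (PySem.List.pyGetD locked j 0 ≠ 0) && decide (f3 ≤ j ∧ j < l2))) := by
    apply List.countP_congr
    intro j _
    by_cases ht : PySem.List.pyGetD locked j 0 ≠ 0 <;>
      by_cases hw1 : f2 ≤ j ∧ j < l1 <;>
      by_cases hw2 : f3 ≤ j ∧ j < l2 <;>
      simp [ht, hw1, hw2]
  rw [hsplit,
      countP_or_disjoint _ _ (by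
        intro j h
        simp only [Bool.and_eq_true, decide_eq_true_eq] at h
        omega),
      countP_window locked f2 l1 h2, countP_window locked f3 l2 h3]
  push_cast
  ring

-- ===== VERDICT (by name: the statement is the Claim_ definition above) =====
theorem minUnlockedIndices_spec : Claim_equal_minUnlockedIndices := by
  intro nums locked _
  unfold Spec_minUnlockedIndices minUnlockedIndices minUnlockedIndices_alt
  simp only [pvLoopA_split]
  -- identify the four boundary values
  have hf2 : pvFirst (· == 2) nums 0 (nums.length : Int)
      = (((PySem.List.enumerate nums 0).find? (fun p => p.2 == 2)).map (·.1)).getD (nums.length : Int) := by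
    rw [pvFirst_eq_find]
    cases h : (PySem.List.enumerate nums 0).find? (fun p => p.2 == 2) with
    | none => rfl
    | some p =>
      have := find?_enumerate_bounds _ nums p h
      simp; omega
  have hf3 : pvFirst (fun x => x != 1 && x != 2) nums 0 (nums.length : Int)
      = (((PySem.List.enumerate nums 0).find? (fun p => p.2 != 1 && p.2 != 2)).map (·.1)).getD (nums.length : Int) := by
    rw [pvFirst_eq_find]
    cases h : (PySem.List.enumerate nums 0).find? (fun p => p.2 != 1 && p.2 != 2) with
    | none => rfl
    | some p =>
      have := find?_enumerate_bounds _ nums p h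
      simp; omega
  have hl1 : pvLast (· == 1) nums 0 (-1)
      = (((PySem.List.enumerate nums.reverse 0).find? (fun p => p.2 == 1)).map
          (fun p => (nums.length : Int) - 1 - p.1)).getD (-1) := by
    rw [pvLast_eq_find]
    cases h : (PySem.List.enumerate nums.reverse 0).find? (fun p => p.2 == 1) <;> simp
  have hl2 : pvLast (· == 2) nums 0 (-1)
      = (((PySem.List.enumerate nums.reverse 0).find? (fun p => p.2 == 2)).map
          (fun p => (nums.length : Int) - 1 - p.1)).getD (-1) := by
    rw [pvLast_eq_find]
    cases h : (PySem.List.enumerate nums.reverse 0).find? (fun p => p.2 == 2) <;> simp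
  simp only [hf2, hf3, hl1, hl2]
  set F2 := (((PySem.List.enumerate nums 0).find? (fun p => p.2 == 2)).map (·.1)).getD (nums.length : Int) with hF2
  set F3 := (((PySem.List.enumerate nums 0).find? (fun p => p.2 != 1 && p.2 != 2)).map (·.1)).getD (nums.length : Int) with hF3
  set L1 := (((PySem.List.enumerate nums.reverse 0).find? (fun p => p.2 == 1)).map
      (fun p => (nums.length : Int) - 1 - p.1)).getD (-1) with hL1
  set L2 := (((PySem.List.enumerate nums.reverse 0).find? (fun p => p.2 == 2)).map
      (fun p => (nums.length : Int) - 1 - p.1)).getD (-1) with hL2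
  by_cases hguard : F3 < L1
  · simp [hguard]
  · simp only [hguard, if_false]
    have h2 : 0 ≤ F2 := by
      rw [hF2]
      cases h : (PySem.List.enumerate nums 0).find? (fun p => p.2 == 2) with
      | none => simp
      | some p => have := find?_enumerate_bounds _ nums p h; simp; omega
    have h3 : 0 ≤ F3 := by
      rw [hF3]
      cases h : (PySem.List.enumerate nums 0).find? (fun p => p.2 != 1 && p.2 != 2) with
      | none => simp
      | some p => have := find?_enumerate_bounds _ nums p h; simp; omega
    exact count_split locked F2 F3 L1 L2 h2 h3 (by omega)
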